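-- pv_equiv track=rewrite | github.com/VeroniqueDM/Python-SoftUni | text_processing_exercise/winning_ticket.py | winning_ticket
-- ===== SOURCE A (Python) =====
-- def winning_ticket(ticket):
--
--     if len(ticket) != 20:
--         return "invalid ticket"
--     first_half = ticket[0:10]
--     second_half = ticket[10:]
--     winning_symbols = ['@', '#', '$', '^']
--     for sym in winning_symbols:
--         for repetition in range (10, 5, -1):
--             char_repetition = sym * repetition
--             if char_repetition in first_half and char_repetition in second_half:
--                 if repetition == 10:
--                     return f"ticket \"{ticket}\" - {repetition}{sym} Jackpot!"
--                 elif 6<=repetition <=9: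
--                     return f"ticket \"{ticket}\" - {repetition}{sym}"
--     return f"ticket \"{ticket}\" - no match"
-- ===== SOURCE B (Python) =====
-- def longest_run(s, sym):
--     cur = best = 0
--     for ch in s:
--         cur = cur + 1 if ch == sym else 0
--         if cur > best:
--             best = cur
--     return best
--
--
-- def winning_ticket(ticket):
--     if len(ticket) != 20:
--         return "invalid ticket"
--     first_half = ticket[0:10]
--     second_half = ticket[10:]
--     for sym in ['@', '#', '$', '^']:
--         best = min(longest_run(first_half, sym), longest_run(second_half, sym))
--         if best == 10:
--             return f"ticket \"{ticket}\" - {best}{sym} Jackpot!"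
--         if best >= 6:
--             return f"ticket \"{ticket}\" - {best}{sym}"
--     return f"ticket \"{ticket}\" - no match"
-- ===== Notes on version B (the rewrite author's own statement) =====
-- stated objective: simpler
-- what changed: Replaces A's nested loop that probes each half for substrings sym*rep with rep counting down from 10 to 6 by a single longest-consecutive-run scan per half per symbol, then compares min(run_first, run_second) directly to the 10/6 thresholds.
import Mathlib
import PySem

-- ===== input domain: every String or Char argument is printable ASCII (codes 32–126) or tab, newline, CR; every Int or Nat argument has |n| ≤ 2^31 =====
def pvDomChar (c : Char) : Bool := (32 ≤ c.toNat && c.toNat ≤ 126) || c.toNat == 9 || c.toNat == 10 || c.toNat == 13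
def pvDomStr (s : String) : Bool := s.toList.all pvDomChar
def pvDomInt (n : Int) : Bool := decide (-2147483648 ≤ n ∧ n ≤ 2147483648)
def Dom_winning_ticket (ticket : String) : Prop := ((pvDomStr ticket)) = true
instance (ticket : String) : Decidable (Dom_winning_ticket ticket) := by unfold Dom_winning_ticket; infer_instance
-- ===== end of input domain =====

-- B replaces A's repeated substring probes (sym*rep in each half, rep = 10..6) by one
-- longest-consecutive-run scan per half and per symbol, then compares min(run, run) to the
-- 10 / 6 thresholds directly; objective: simpler.

-- ===== PORT A =====
-- inner loop 'for repetition in range(10, 5, -1)': returns some s on an early return, none if it falls through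
def wtRep (ticket : String) (first second : List Char) (sym : Char) : List Int → Option String
  | [] => none
  | rep :: rest =>
    let char_repetition := List.replicate rep.toNat sym
    if PySem.Chars.isIn char_repetition first && PySem.Chars.isIn char_repetition second then
      if rep = 10 then
        some ("ticket \"" ++ ticket ++ "\" - " ++ PySem.Int.toStr rep ++ String.singleton sym ++ " Jackpot!")
      else if 6 ≤ rep ∧ rep ≤ 9 then
        some ("ticket \"" ++ ticket ++ "\" - " ++ PySem.Int.toStr rep ++ String.singleton sym)
      else wtRep ticket first second sym rest
    else wtRep ticket first second sym rest

-- outer loop 'for sym in winning_symbols'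
def wtSym (ticket : String) (first second : List Char) : List Char → String
  | [] => "ticket \"" ++ ticket ++ "\" - no match"
  | sym :: rest =>
    match wtRep ticket first second sym (PySem.List.pyRange 10 5 (-1)) with
    | some s => s
    | none => wtSym ticket first second rest

def winning_ticket (ticket : String) : String :=
  if PySem.Str.len ticket ≠ 20 then "invalid ticket"
  else
    let first_half := PySem.List.slice ticket.toList (some 0) (some 10)
    let second_half := PySem.List.slice ticket.toList (some 10) none
    wtSym ticket first_half second_half ['@', '#', '$', '^']

-- ===== PORT B =====
-- longest_run from Source B: one pass, (current run, best run) accumulator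
def longest_run (s : List Char) (sym : Char) : Int :=
  (s.foldl (fun p ch =>
      let cur := if ch = sym then p.1 + 1 else 0
      (cur, if p.2 < cur then cur else p.2)) ((0 : Int), (0 : Int))).2

def altSym (ticket : String) (first second : List Char) : List Char → String
  | [] => "ticket \"" ++ ticket ++ "\" - no match"
  | sym :: rest =>
    let best := min (longest_run first sym) (longest_run second sym)
    if best = 10 then
      "ticket \"" ++ ticket ++ "\" - " ++ PySem.Int.toStr best ++ String.singleton sym ++ " Jackpot!"
    else if 6 ≤ best then
      "ticket \"" ++ ticket ++ "\" - " ++ PySem.Int.toStr best ++ String.singleton sym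
    else altSym ticket first second rest

def winning_ticket_alt (ticket : String) : String :=
  if PySem.Str.len ticket ≠ 20 then "invalid ticket"
  else
    let first_half := PySem.List.slice ticket.toList (some 0) (some 10)
    let second_half := PySem.List.slice ticket.toList (some 10) none
    altSym ticket first_half second_half ['@', '#', '$', '^']

-- ===== PRECONDITION & SPEC =====
def Spec_winning_ticket (ticket : String) (out : String) : Prop := out = winning_ticket_alt ticket
instance (ticket : String) (out : String) : Decidable (Spec_winning_ticket ticket out) := by unfold Spec_winning_ticket; infer_instance

-- ===== CLAIM (what is proved, stated in full; the proofs are below) =====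
def Claim_equal_winning_ticket : Prop := ∀ (ticket : String), Dom_winning_ticket ticket → Spec_winning_ticket ticket (winning_ticket ticket)

-- ===== LEMMAS AND PROOFS =====

-- length of the leading run of c
def pvLead (c : Char) (s : List Char) : Nat := (s.takeWhile (· = c)).length

-- longest run of c anywhere in s (max of leading runs of all suffixes)
def pvMr (c : Char) : List Char → Nat
  | [] => 0
  | x :: xs => max (pvLead c (x :: xs)) (pvMr c xs)

theorem pvLead_cons_self (c : Char) (xs : List Char) :
    pvLead c (c :: xs) = pvLead c xs + 1 := by
  simp [pvLead]

theorem pvLead_cons_ne (c x : Char) (xs : List Char) (hx : x ≠ c) :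
    pvLead c (x :: xs) = 0 := by
  simp [pvLead, hx]

theorem pvMr_cons (c x : Char) (xs : List Char) :
    pvMr c (x :: xs) = max (pvLead c (x :: xs)) (pvMr c xs) := rfl

theorem pvLead_le_length (c : Char) (s : List Char) : pvLead c s ≤ s.length :=
  (List.takeWhile_sublist _).length_le

theorem pvLead_le_pvMr (c : Char) (s : List Char) : pvLead c s ≤ pvMr c s := by
  cases s with
  | nil => simp [pvLead, pvMr]
  | cons x xs => exact le_max_left _ _

theorem pvMr_le_length (c : Char) (s : List Char) : pvMr c s ≤ s.length := by
  induction s with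
  | nil => simp [pvMr]
  | cons x xs ih =>
    simp only [pvMr, max_le_iff]
    exact ⟨pvLead_le_length _ _, le_trans ih (by simp)⟩

theorem replicate_prefix_iff (c : Char) (k : Nat) (s : List Char) :
    List.replicate k c <+: s ↔ k ≤ pvLead c s := by
  induction k generalizing s with
  | zero => simp
  | succ n ih =>
    cases s with
    | nil => simp [pvLead, List.replicate_succ]
    | cons x xs =>
      by_cases hx : x = c
      · subst hx
        rw [List.replicate_succ, List.cons_prefix_cons, pvLead_cons_self]
        constructor
        · rintro ⟨-, h⟩
          have := (ih xs).mp h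
          omega
        · intro h
          exact ⟨rfl, (ih xs).mpr (by omega)⟩
      · rw [List.replicate_succ, List.cons_prefix_cons, pvLead_cons_ne c x xs hx]
        constructor
        · rintro ⟨h, -⟩; exact absurd h.symm hx
        · omega

theorem replicate_infix_iff (c : Char) (k : Nat) (s : List Char) :
    List.replicate k c <:+: s ↔ k ≤ pvMr c s := by
  induction s with
  | nil =>
    simp only [List.infix_nil, List.replicate_eq_nil_iff, pvMr]
    omega
  | cons x xs ih =>
    rw [List.infix_cons_iff, replicate_prefix_iff, ih, pvMr_cons]
    omega

-- the value of the Nat version of Source B's scan, written as structural recursion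
def pvM (c : Char) (cur : Nat) : List Char → Nat
  | [] => 0
  | x :: xs =>
    let cur' := if x = c then cur + 1 else 0
    max cur' (pvM c cur' xs)

theorem longest_run_fold (c : Char) (s : List Char) :
    ∀ (cur best : Nat),
      (s.foldl (fun p ch =>
          let cur := if ch = c then p.1 + 1 else 0
          (cur, if p.2 < cur then cur else p.2)) ((cur : Int), (best : Int))).2
        = ((max best (pvM c cur s) : Nat) : Int) := by
  induction s with
  | nil => intro cur best; simp [pvM]
  | cons x xs ih =>
    intro cur best
    rw [List.foldl_cons]
    have hstep : (let cur' := if x = c then ((cur : Int), (best : Int)).1 + 1 else 0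
          (cur', if ((cur : Int), (best : Int)).2 < cur' then cur'
            else ((cur : Int), (best : Int)).2))
        = ((((if x = c then cur + 1 else 0 : Nat)) : Int),
           (((max best (if x = c then cur + 1 else 0) : Nat)) : Int)) := by
      by_cases hx : x = c <;> simp [hx, Prod.ext_iff, Nat.cast_max] <;>
        split_ifs <;> omega
    rw [hstep, ih]
    simp only [pvM]
    congr 1
    exact Nat.max_assoc best _ _

theorem pvM_eq (c : Char) (s : List Char) :
    ∀ cur, pvM c cur s = max (if 0 < pvLead c s then cur + pvLead c s else 0) (pvMr c s) := by
  induction s with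
  | nil => intro cur; simp [pvM, pvLead, pvMr]
  | cons x xs ih =>
    intro cur
    by_cases hx : x = c
    · subst hx
      have hstep : pvM x cur (x :: xs) = max (cur + 1) (pvM x (cur + 1) xs) := by
        simp [pvM]
      rw [hstep, ih (cur + 1), pvMr_cons, pvLead_cons_self]
      have hle := pvLead_le_pvMr x xs
      by_cases h0 : 0 < pvLead x xs <;> simp [h0] <;> omega
    · have hstep : pvM c cur (x :: xs) = max 0 (pvM c 0 xs) := by
        simp [pvM, hx]
      rw [hstep, ih 0, pvMr_cons, pvLead_cons_ne c x xs hx]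
      have hle := pvLead_le_pvMr c xs
      by_cases h0 : 0 < pvLead c xs <;> simp [h0] <;> omega

theorem longest_run_eq (s : List Char) (c : Char) :
    longest_run s c = ((pvMr c s : Nat) : Int) := by
  have h := longest_run_fold c s 0 0
  simp only [Nat.cast_zero] at h
  rw [longest_run, h, Nat.zero_max, pvM_eq c s 0]
  congr 1
  have hle := pvLead_le_pvMr c s
  by_cases h0 : 0 < pvLead c s <;> simp [h0] <;> omega

-- the && condition of A's inner loop, as a threshold on the min of the two longest runs
theorem condA (first second : List Char) (sym : Char) (n : Nat) :
    (PySem.Chars.isIn (List.replicate n sym) first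
      && PySem.Chars.isIn (List.replicate n sym) second)
      = decide (n ≤ min (pvMr sym first) (pvMr sym second)) := by
  by_cases h1 : List.replicate n sym <:+: first
  · by_cases h2 : List.replicate n sym <:+: second
    · rw [(PySem.Chars.isIn_iff_infix _ _).mpr h1, (PySem.Chars.isIn_iff_infix _ _).mpr h2]
      rw [replicate_infix_iff] at h1 h2
      simp [h1, h2]
    · rw [(PySem.Chars.isIn_eq_false_iff _ _).mpr h2]
      rw [replicate_infix_iff] at h2
      simp
      omega
  · rw [(PySem.Chars.isIn_eq_false_iff _ _).mpr h1]
    rw [replicate_infix_iff] at h1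
    simp
    omega

set_option maxHeartbeats 1000000 in
theorem symEq (ticket : String) (first second : List Char)
    (h1 : first.length = 10) (_h2 : second.length = 10) :
    ∀ syms, wtSym ticket first second syms = altSym ticket first second syms := by
  intro syms
  induction syms with
  | nil => rfl
  | cons sym rest ih =>
    have hr : PySem.List.pyRange 10 5 (-1) = [10, 9, 8, 7, 6] := by decide
    set b := min (pvMr sym first) (pvMr sym second) with hb
    have hble : b ≤ 10 := by
      have := pvMr_le_length sym first
      omega
    have hbest : min (longest_run first sym) (longest_run second sym) = ((b : Nat) : Int) := by
      rw [longest_run_eq, longest_run_eq, hb]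
      push_cast
      rfl
    rw [wtSym, altSym, hr, hbest]
    have c10 := condA first second sym 10
    have c9 := condA first second sym 9
    have c8 := condA first second sym 8
    have c7 := condA first second sym 7
    have c6 := condA first second sym 6
    rw [← hb] at c10 c9 c8 c7 c6
    simp only [wtRep, show ((10 : Int)).toNat = 10 from rfl, show ((9 : Int)).toNat = 9 from rfl,
      show ((8 : Int)).toNat = 8 from rfl, show ((7 : Int)).toNat = 7 from rfl,
      show ((6 : Int)).toNat = 6 from rfl, c10, c9, c8, c7, c6]
    interval_cases b <;> simp [ih]

theorem winning_ticket_spec_aux (ticket : String) :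
    winning_ticket ticket = winning_ticket_alt ticket := by
  rw [winning_ticket, winning_ticket_alt]
  by_cases h : PySem.Str.len ticket ≠ 20
  · rw [if_pos h, if_pos h]
  · rw [if_neg h, if_neg h]
    have hlen : ticket.toList.length = 20 := by
      simp only [PySem.Str.len_eq, ne_eq, not_not] at h
      exact_mod_cast h
    apply symEq
    · simp [pysem, hlen]
    · simp [pysem, hlen]

-- ===== VERDICT (by name: the statement is the Claim_ definition above) =====
theorem winning_ticket_spec : Claim_equal_winning_ticket := by
  intro ticket _
  unfold Spec_winning_ticket
  exact winning_ticket_spec_aux ticket
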